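-- pv_equiv track=rewrite | github.com/jboiie/AdventOfCode | D6/part2.py | split_into_problems
-- ===== SOURCE A (Python) =====
-- def is_blank_column(grid, col):
--     # A column is blank if *every* row has a space in this column
--     return all(row[col] == " " for row in grid)
--
-- def split_into_problems(grid):
--     """
--     Split columns into problems using completely blank columns as separators.
--     Returns a list of lists of column indices, each list = one problem.
--     """
--     height = len(grid)
--     width = len(grid[0])
--
--     problems = []
--     current = []
--
--     for col in range(width):
--         if is_blank_column(grid, col):
--             # Separator: end current problem (if any)
--             if current:
--                 problems.append(current)
--                 current = []
--         else:
--             current.append(col)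
--
--     if current:
--         problems.append(current)
--
--     return problems
-- ===== SOURCE B (Python) =====
-- def is_blank_column(grid, col):
--     # A column is blank if *every* row has a space in this column
--     return all(row[col] == " " for row in grid)
--
-- def split_into_problems(grid):
--     """
--     Split columns into problems using completely blank columns as separators.
--     Precompute a blankness mask, then sweep it with an index, emitting each
--     maximal run of non-blank columns as a range in one step.
--     """
--     width = len(grid[0])
--     blank = [is_blank_column(grid, col) for col in range(width)]
--
--     problems = []
--     col = 0
--     while col < width:
--         if blank[col]:
--             col += 1
--         else:
--             start = col
--             while col < width and not blank[col]:
--                 col += 1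
--             problems.append(list(range(start, col)))
--     return problems
-- ===== Notes on version B (the rewrite author's own statement) =====
-- stated objective: alternative
-- what changed: B replaces A's accumulator-with-flush state machine by precomputing the column blankness mask once and then sweeping it with an index, emitting each maximal non-blank run as a range in a single step (no `current` list grown element by element).
import Mathlib
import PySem

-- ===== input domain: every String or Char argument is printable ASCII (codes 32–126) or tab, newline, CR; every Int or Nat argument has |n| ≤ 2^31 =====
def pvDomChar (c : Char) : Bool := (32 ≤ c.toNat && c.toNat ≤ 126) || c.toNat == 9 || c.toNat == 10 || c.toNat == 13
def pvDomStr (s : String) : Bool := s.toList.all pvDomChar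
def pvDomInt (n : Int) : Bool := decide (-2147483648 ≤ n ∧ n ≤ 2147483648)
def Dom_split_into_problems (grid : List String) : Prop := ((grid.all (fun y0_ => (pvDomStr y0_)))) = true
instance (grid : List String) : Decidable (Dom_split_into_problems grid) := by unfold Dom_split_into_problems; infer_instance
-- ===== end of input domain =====

-- B replaces A's accumulator/flush state machine by a precomputed blankness mask swept run by run (objective: alternative, same cost).

-- ===== PORT A =====
-- all(row[col] == " " for row in grid); short-circuit matches List.all, and pyGet? = none (IndexError) is excluded by Pre_.
def is_blank_column (grid : List String) (col : Int) : Bool :=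
  grid.all (fun row => PySem.Str.pyGet? row col == some ' ')

def split_into_problems (grid : List String) : List (List Int) :=
  let _height : Int := (grid.length : Int)
  let width : Int := PySem.Str.len (grid.headD "")   -- len(grid[0]); [] raises IndexError, excluded by Pre_
  let st := (PySem.List.pyRange 0 width 1).foldl
    (fun (s : List (List Int) × List Int) col =>
      if is_blank_column grid col then
        (if s.2 ≠ [] then (s.1 ++ [s.2], ([] : List Int)) else s)
      else
        (s.1, s.2 ++ [col])) ([], [])
  if st.2 ≠ [] then st.1 ++ [st.2] else st.1

-- ===== PORT B =====
-- length of the leading run of `False` (non-blank) entries in the mask: B's inner while loop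
def pvLeadRun : List Bool → Nat
  | false :: rest => pvLeadRun rest + 1
  | _ => 0

-- B's outer while loop over the mask: skip blanks, else emit list(range(start, col)) for the maximal non-blank run
def pvEmitRuns : List Bool → Int → List (List Int)
  | [], _ => []
  | true :: rest, col => pvEmitRuns rest (col + 1)
  | false :: rest, col =>
    PySem.List.pyRange col (col + 1 + (pvLeadRun rest : Int)) 1 ::
      pvEmitRuns (rest.drop (pvLeadRun rest)) (col + 1 + (pvLeadRun rest : Int))
termination_by m _ => m.length
decreasing_by all_goals (simp; try omega)

def split_into_problems_alt (grid : List String) : List (List Int) :=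
  let width : Int := PySem.Str.len (grid.headD "")
  let blank := (PySem.List.pyRange 0 width 1).map (fun col => is_blank_column grid col)
  pvEmitRuns blank 0

-- ===== PRECONDITION & SPEC =====
-- Pre_ excludes exactly the inputs where A raises: the empty grid (len(grid[0]) IndexError), and grids where
-- some column scan hits a too-short row while every earlier row had a space in that column (IndexError in all(...)).
def Pre_split_into_problems (grid : List String) : Prop :=
  grid ≠ [] ∧
  ∀ col < (grid.headD "").toList.length, ∀ i < grid.length,
    (∀ j < i, ((grid.getD j "").toList[col]? = some ' ')) →
    col < (grid.getD i "").toList.length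
instance (grid : List String) : Decidable (Pre_split_into_problems grid) := by
  unfold Pre_split_into_problems; infer_instance

def pvWitness_split_into_problems : List String := ["ab a", "c  d"]

def Spec_split_into_problems (grid : List String) (out : List (List Int)) : Prop := out = split_into_problems_alt grid
instance (grid : List String) (out : List (List Int)) : Decidable (Spec_split_into_problems grid out) := by unfold Spec_split_into_problems; infer_instance

-- ===== CLAIM (what is proved, stated in full; the proofs are below) =====
def Claim_equal_split_into_problems : Prop := ∀ (grid : List String), Dom_split_into_problems grid → Pre_split_into_problems grid → Spec_split_into_problems grid (split_into_problems grid)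

-- ===== LEMMAS AND PROOFS =====

-- reference recursion: one column at a time, A-style state (current accumulator), parameterised by the blankness predicate
def pvSweep (f : Int → Bool) : Nat → Int → List Int → List (List Int)
  | 0, _, cur => if cur ≠ [] then [cur] else []
  | n+1, c, cur =>
    if f c then
      (if cur ≠ [] then cur :: pvSweep f n (c+1) [] else pvSweep f n (c+1) [])
    else pvSweep f n (c+1) (cur ++ [c])

-- number of leading columns in [c, c+n) on which f is false
def pvLeadN (f : Int → Bool) : Nat → Int → Nat
  | 0, _ => 0
  | n+1, c => if f c then 0 else pvLeadN f n (c+1) + 1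

lemma pvLeadN_le (f : Int → Bool) : ∀ (n : Nat) (c : Int), pvLeadN f n c ≤ n := by
  intro n
  induction n with
  | zero => intro c; simp [pvLeadN]
  | succ n ih =>
    intro c
    simp only [pvLeadN]
    split
    · omega
    · have := ih (c+1); omega

lemma pvLeadRun_map (f : Int → Bool) : ∀ (n : Nat) (c : Int),
    pvLeadRun ((PySem.List.pyRange c (c + (n : Int)) 1).map f) = pvLeadN f n c := by
  intro n
  induction n with
  | zero => intro c; rw [PySem.List.pyRange_one_eq_nil (by omega)]; simp [pvLeadRun, pvLeadN]
  | succ n ih =>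
    intro c
    push_cast
    rw [PySem.List.pyRange_one_cons (by omega : c < c + ((n:Int)+1))]
    have hr : c + ((n : Int) + 1) = (c + 1) + (n : Int) := by ring
    rw [hr]
    simp only [List.map_cons, pvLeadN]
    cases hfc : f c with
    | true => simp [pvLeadRun]
    | false => simp only [pvLeadRun, ih (c+1)]; simp

-- A's foldl, started in state (ps, cur), finishes to ps ++ pvSweep f n c cur
lemma pvFold_eq (f : Int → Bool) : ∀ (n : Nat) (c : Int) (ps : List (List Int)) (cur : List Int),
    (let st := (PySem.List.pyRange c (c + (n : Int)) 1).foldl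
      (fun (s : List (List Int) × List Int) col =>
        if f col then
          (if s.2 ≠ [] then (s.1 ++ [s.2], ([] : List Int)) else s)
        else
          (s.1, s.2 ++ [col])) (ps, cur);
     if st.2 ≠ [] then st.1 ++ [st.2] else st.1) = ps ++ pvSweep f n c cur := by
  intro n
  induction n with
  | zero =>
    intro c ps cur
    rw [PySem.List.pyRange_one_eq_nil (by omega)]
    simp only [List.foldl_nil, pvSweep]
    by_cases h : cur = [] <;> simp [h]
  | succ n ih =>
    intro c ps cur
    push_cast
    rw [PySem.List.pyRange_one_cons (by omega : c < c + ((n:Int)+1))]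
    have hr : c + ((n : Int) + 1) = (c + 1) + (n : Int) := by ring
    rw [hr]
    simp only [List.foldl_cons, pvSweep]
    by_cases hfc : f c
    · by_cases hcur : cur = []
      · simp only [hfc, hcur, if_pos, ne_eq, not_true_eq_false, if_false]
        simpa [hcur] using ih (c+1) ps []
      · simp only [hfc, hcur, ne_eq, not_false_eq_true, if_true]
        have := ih (c+1) (ps ++ [cur]) []
        simp only [List.append_assoc] at this
        simpa [hcur, hfc] using this
    · simp only [hfc]
      simpa [hfc] using ih (c+1) ps (cur ++ [c])

-- a nonempty current run absorbs the leading non-blank columns and is emitted whole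
lemma pvSweep_run (f : Int → Bool) : ∀ (n : Nat) (c : Int) (cur : List Int), cur ≠ [] →
    pvSweep f n c cur =
      (cur ++ PySem.List.pyRange c (c + (pvLeadN f n c : Int)) 1) ::
        pvSweep f (n - pvLeadN f n c) (c + (pvLeadN f n c : Int)) [] := by
  intro n
  induction n with
  | zero =>
    intro c cur hcur
    simp only [pvLeadN]
    rw [PySem.List.pyRange_one_eq_nil (by omega)]
    simp [pvSweep, hcur]
  | succ n ih =>
    intro c cur hcur
    by_cases hfc : f c
    · have hl : pvLeadN f (n+1) c = 0 := by simp [pvLeadN, hfc]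
      rw [hl]
      simp only [Nat.cast_zero, add_zero, Nat.sub_zero]
      rw [PySem.List.pyRange_one_eq_nil (le_refl c)]
      simp [pvSweep, hfc, hcur]
    · have hl : pvLeadN f (n+1) c = pvLeadN f n (c+1) + 1 := by simp [pvLeadN, hfc]
      have hs : pvSweep f (n+1) c cur = pvSweep f n (c+1) (cur ++ [c]) := by simp [pvSweep, hfc]
      rw [hl, hs]
      have step : pvSweep f n (c+1) (cur ++ [c]) =
          ((cur ++ [c]) ++ PySem.List.pyRange (c+1) ((c+1) + (pvLeadN f n (c+1) : Int)) 1) ::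
            pvSweep f (n - pvLeadN f n (c+1)) ((c+1) + (pvLeadN f n (c+1) : Int)) [] :=
        ih (c+1) (cur ++ [c]) (by simp)
      rw [step]
      have hcons : PySem.List.pyRange c (c + ((pvLeadN f n (c+1) : Int) + 1)) 1 =
          c :: PySem.List.pyRange (c+1) (c + ((pvLeadN f n (c+1) : Int) + 1)) 1 :=
        PySem.List.pyRange_one_cons (by omega)
      have harith : c + ((pvLeadN f n (c+1) : Int) + 1) = (c+1) + (pvLeadN f n (c+1) : Int) := by ring
      have hsub : n + 1 - (pvLeadN f n (c+1) + 1) = n - pvLeadN f n (c+1) := by omega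
      rw [hsub]
      congr 1
      · rw [show ((pvLeadN f n (c+1) + 1 : Nat) : Int) = (pvLeadN f n (c+1) : Int) + 1 by push_cast; ring,
            hcons, harith]
        simp
      · rw [show ((pvLeadN f n (c+1) + 1 : Nat) : Int) = (pvLeadN f n (c+1) : Int) + 1 by push_cast; ring,
            harith]

-- B's mask sweep computes pvSweep with empty current run
lemma pvEmit_eq (f : Int → Bool) : ∀ (N n : Nat), n ≤ N → ∀ (c : Int),
    pvEmitRuns ((PySem.List.pyRange c (c + (n : Int)) 1).map f) c = pvSweep f n c [] := by
  intro N
  induction N with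
  | zero =>
    intro n hn c
    interval_cases n
    rw [PySem.List.pyRange_one_eq_nil (by omega)]
    simp [pvEmitRuns, pvSweep]
  | succ N ih =>
    intro n hn c
    cases n with
    | zero =>
      rw [PySem.List.pyRange_one_eq_nil (by omega)]
      simp [pvEmitRuns, pvSweep]
    | succ n =>
      push_cast
      rw [PySem.List.pyRange_one_cons (by omega : c < c + ((n:Int)+1))]
      have hr : c + ((n : Int) + 1) = (c + 1) + (n : Int) := by ring
      rw [hr]
      simp only [List.map_cons]
      cases hfc : f c with
      | true =>
        rw [pvEmitRuns]
        have := ih n (by omega) (c+1)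
        rw [this]
        simp [pvSweep, hfc]
      | false =>
        rw [pvEmitRuns]
        set k := pvLeadN f n (c+1) with hk
        have hkle : k ≤ n := pvLeadN_le f n (c+1)
        have hlead : pvLeadRun ((PySem.List.pyRange (c+1) ((c+1) + (n : Int)) 1).map f) = k :=
          pvLeadRun_map f n (c+1)
        have hsplit : PySem.List.pyRange (c+1) ((c+1) + (n : Int)) 1 =
            PySem.List.pyRange (c+1) ((c+1) + (k : Int)) 1 ++
            PySem.List.pyRange ((c+1) + (k : Int)) ((c+1) + (n : Int)) 1 :=
          PySem.List.pyRange_one_append _ _ _ (by omega) (by omega)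
        have hlen : ((PySem.List.pyRange (c+1) ((c+1) + (k : Int)) 1).map f).length = k := by
          rw [List.length_map, PySem.List.length_pyRange_one]; omega
        have hdrop : ((PySem.List.pyRange (c+1) ((c+1) + (n : Int)) 1).map f).drop k =
            (PySem.List.pyRange ((c+1) + (k : Int)) ((c+1) + (n : Int)) 1).map f := by
          rw [hsplit, List.map_append, List.drop_left' hlen]
        rw [hlead, hdrop]
        have htail : (c+1) + (n : Int) = ((c+1) + (k : Int)) + ((n - k : Nat) : Int) := by
          push_cast [Nat.cast_sub hkle]; ring
        rw [htail]
        rw [ih (n - k) (by omega) ((c+1) + (k : Int))]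
        -- now the sweep side
        rw [show pvSweep f (n+1) c [] = pvSweep f n (c+1) [c] by simp [pvSweep, hfc]]
        rw [pvSweep_run f n (c+1) [c] (by simp), ← hk]
        congr 1
        rw [show c + 1 + (k : Int) = c + ((k : Int) + 1) by ring,
            PySem.List.pyRange_one_cons (by omega : c < c + ((k : Int) + 1)),
            show c + ((k : Int) + 1) = c + 1 + (k : Int) by ring]
        simp

-- ===== VERDICT (by name: the statement is the Claim_ definition above) =====
theorem split_into_problems_spec : Claim_equal_split_into_problems := by
  intro grid _ _
  unfold Spec_split_into_problems split_into_problems split_into_problems_alt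
  set f : Int → Bool := fun col => is_blank_column grid col with hf
  have hw : 0 ≤ PySem.Str.len (grid.headD "") := by
    rw [PySem.Str.len_eq]; positivity
  set w : Int := PySem.Str.len (grid.headD "") with hwdef
  have hwn : w = ((w.toNat : Nat) : Int) := by omega
  have hA := pvFold_eq f w.toNat 0 [] []
  have hB := pvEmit_eq f w.toNat w.toNat le_rfl 0
  simp only [zero_add] at hA hB
  rw [← hwn] at hA hB
  simp only at hA ⊢
  rw [hA, hB]
  simp
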